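-- pv_equiv track=rewrite | github.com/jikssha/linuxdo-monitor | src/linuxdo_monitor/utils.py | category_matches
-- ===== SOURCE A (Python) =====
-- from typing import Dict, List, Optional, Set
--
-- def category_matches(
--     subscription_category_id: Optional[int],
--     post_category_id: Optional[int],
--     category_parent_map: Dict[int, Optional[int]],
-- ) -> bool:
--     """Return True when a subscription category should match a post category."""
--     if subscription_category_id is None:
--         return True
--     if post_category_id is None:
--         return False
--     if subscription_category_id == post_category_id:
--         return True
--
--     current_category_id = post_category_id
--     visited: Set[int] = set()
--     while current_category_id is not None and current_category_id not in visited: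
--         visited.add(current_category_id)
--         current_category_id = category_parent_map.get(current_category_id)
--         if current_category_id == subscription_category_id:
--             return True
--     return False
-- ===== SOURCE B (Python) =====
-- def category_matches(subscription_category_id, post_category_id, category_parent_map):
--     """Return True when a subscription category should match a post category."""
--     if subscription_category_id is None:
--         return True
--     if post_category_id is None:
--         return False
--     # Reverse-direction fixpoint: instead of climbing parents from the post,
--     # saturate the set of categories covered by the subscription (the
--     # subscription category and, repeatedly, every child of a covered
--     # category), stopping when a pass adds nothing.  len(map) rounds always
--     # suffice because a shortest parent chain never repeats a key.  Then a
--     # single membership test answers the query.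
--     covered = {subscription_category_id}
--     for _ in range(len(category_parent_map)):
--         size = len(covered)
--         for child, parent in category_parent_map.items():
--             if parent is not None and parent in covered:
--                 covered.add(child)
--         if len(covered) == size:
--             break
--     return post_category_id in covered
-- ===== Notes on version B (the rewrite author's own statement) =====
-- stated objective: alternative
-- what changed: A climbs the parent chain upward from the post with a visited set and an early-exit equality check; B searches in the opposite direction, computing by round-based saturation (with an early stop when a pass adds nothing) the set of all categories covered by the subscription, i.e. the descendant closure over the reversed parent edges, and answering with one membership test.
import Mathlib
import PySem

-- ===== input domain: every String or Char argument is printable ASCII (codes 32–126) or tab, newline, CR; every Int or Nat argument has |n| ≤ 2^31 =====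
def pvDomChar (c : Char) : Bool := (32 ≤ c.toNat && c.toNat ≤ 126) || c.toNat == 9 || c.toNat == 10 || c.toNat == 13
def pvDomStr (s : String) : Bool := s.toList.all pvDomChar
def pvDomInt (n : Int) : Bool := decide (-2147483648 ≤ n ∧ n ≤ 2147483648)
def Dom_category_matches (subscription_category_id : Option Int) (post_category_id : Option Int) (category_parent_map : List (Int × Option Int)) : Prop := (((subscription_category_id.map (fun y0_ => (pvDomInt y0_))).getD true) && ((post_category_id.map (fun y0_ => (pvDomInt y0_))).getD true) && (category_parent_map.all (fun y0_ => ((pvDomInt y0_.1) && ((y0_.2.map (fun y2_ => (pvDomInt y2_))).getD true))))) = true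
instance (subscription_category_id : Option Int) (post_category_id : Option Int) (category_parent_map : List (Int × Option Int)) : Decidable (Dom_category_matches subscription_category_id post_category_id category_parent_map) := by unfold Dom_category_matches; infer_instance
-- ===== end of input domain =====

-- B replaces A's upward parent-chain climb from the post by a reverse-direction fixpoint:
-- it saturates the set of categories covered by the subscription (descendant closure over
-- the reversed parent edges) and ends with one membership test (alternative algorithm, not faster).


-- ===== PORT A =====
-- A's while loop, fuel-bounded. Each iteration adds `cur` to `visited` (the loop stops on a
-- revisit), and every iterate but the last is a key of the map, so `map.size + 1` iterations suffice.
def aLoop (sub : Int) (m : PySem.Dict Int (Option Int)) : Nat → Option Int → PySem.Set Int → Bool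
  | 0, _, _ => false
  | fuel + 1, cur, visited =>
    match cur with
    | none => false
    | some c =>
      if PySem.Set.contains visited c then false
      else
        let visited' := PySem.Set.add visited c
        let next := m.getD c none          -- category_parent_map.get(current_category_id)
        if next == some sub then true      -- the in-loop equality check
        else aLoop sub m fuel next visited'

def category_matches (subscription_category_id : Option Int) (post_category_id : Option Int) (category_parent_map : List (Int × Option Int)) : Bool :=
  match subscription_category_id with
  | none => true
  | some s =>
    match post_category_id with
    | none => false
    | some p =>
      if s == p then true
      else
        let m := PySem.Dict.ofList category_parent_map
        aLoop s m (category_parent_map.length + 1) (some p) PySem.Set.empty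

-- ===== PORT B =====
-- B's inner loop: one saturation pass over the dict items, adding every child whose parent is covered.
def bPass (items : List (Int × Option Int)) (covered : PySem.Set Int) : PySem.Set Int :=
  items.foldl (fun r cp =>
    match cp.2 with
    | some parent => if PySem.Set.contains r parent then PySem.Set.add r cp.1 else r
    | none => r) covered

-- B's outer loop: at most len(map) passes, stopping early when a pass adds nothing.
def bRounds (items : List (Int × Option Int)) : Nat → PySem.Set Int → PySem.Set Int
  | 0, covered => covered
  | n + 1, covered =>
    let size := PySem.Set.len covered
    let covered' := bPass items covered
    if PySem.Set.len covered' == size then covered' else bRounds items n covered'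

def category_matches_alt (subscription_category_id : Option Int) (post_category_id : Option Int) (category_parent_map : List (Int × Option Int)) : Bool :=
  match subscription_category_id with
  | none => true
  | some s =>
    match post_category_id with
    | none => false
    | some p =>
      let d := PySem.Dict.ofList category_parent_map
      -- covered = {s}; for _ in range(len(map)): one pass over items, break on no change
      let covered := bRounds d.items category_parent_map.length (PySem.Set.add PySem.Set.empty s)
      PySem.Set.contains covered p

-- ===== PRECONDITION & SPEC =====
def Spec_category_matches (subscription_category_id : Option Int) (post_category_id : Option Int) (category_parent_map : List (Int × Option Int)) (out : Bool) : Prop := out = category_matches_alt subscription_category_id post_category_id category_parent_map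
instance (subscription_category_id : Option Int) (post_category_id : Option Int) (category_parent_map : List (Int × Option Int)) (out : Bool) : Decidable (Spec_category_matches subscription_category_id post_category_id category_parent_map out) := by unfold Spec_category_matches; infer_instance

-- ===== CLAIM (what is proved, stated in full; the proofs are below) =====
def Claim_equal_category_matches : Prop := ∀ (subscription_category_id : Option Int) (post_category_id : Option Int) (category_parent_map : List (Int × Option Int)), Dom_category_matches subscription_category_id post_category_id category_parent_map → Spec_category_matches subscription_category_id post_category_id category_parent_map (category_matches subscription_category_id post_category_id category_parent_map)

-- ===== LEMMAS AND PROOFS =====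

-- Both programs are characterised against parent-chain iteration: `pstep d` maps a current
-- category to its parent (none when absent or None), and `(pstep d)^[k]` iterates it.
def pmap (d : PySem.Dict Int (Option Int)) (c : Int) : Option Int := d.getD c none
def pstep (d : PySem.Dict Int (Option Int)) (o : Option Int) : Option Int := o.bind (pmap d)

theorem pstep_iterate_none (d : PySem.Dict Int (Option Int)) (k : Nat) :
    (pstep d)^[k] none = none := by
  induction k with
  | zero => rfl
  | succ n ih => rw [Function.iterate_succ_apply]; exact ih

theorem iter_isSome (d : PySem.Dict Int (Option Int)) (x : Option Int) (s : Int) (t k : Nat)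
    (ht : t ≤ k) (hk : (pstep d)^[k] x = some s) : ∃ c, (pstep d)^[t] x = some c := by
  cases hc : (pstep d)^[t] x with
  | some c => exact ⟨c, rfl⟩
  | none =>
    exfalso
    have hsplit : (pstep d)^[k] x = none := by
      have hkeq : k = (k - t) + t := by omega
      rw [hkeq, Function.iterate_add_apply, hc, pstep_iterate_none]
    rw [hsplit] at hk; simp at hk

-- Before a minimal hit of `s`, the iterates are pairwise distinct.
theorem iter_inj (d : PySem.Dict Int (Option Int)) (p s : Int) (k : Nat)
    (hk : (pstep d)^[k] (some p) = some s)
    (hmin : ∀ j, j < k → (pstep d)^[j] (some p) ≠ some s) :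
    ∀ i j, i < j → j ≤ k → (pstep d)^[i] (some p) ≠ (pstep d)^[j] (some p) := by
  intro i j hij hjk heq
  have hhit : (pstep d)^[k - j + i] (some p) = some s := by
    calc (pstep d)^[k - j + i] (some p)
        = (pstep d)^[k - j] ((pstep d)^[i] (some p)) := Function.iterate_add_apply _ _ _ _
      _ = (pstep d)^[k - j] ((pstep d)^[j] (some p)) := by rw [heq]
      _ = (pstep d)^[k - j + j] (some p) := (Function.iterate_add_apply _ _ _ _).symm
      _ = some s := by rw [Nat.sub_add_cancel hjk]; exact hk
  exact hmin _ (by omega) hhit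

-- A minimal chain from p to s only passes through (distinct) keys of the dict: k ≤ #keys.
theorem chain_le_keys (d : PySem.Dict Int (Option Int)) (p s : Int) (k : Nat)
    (hk : (pstep d)^[k] (some p) = some s)
    (hmin : ∀ j, j < k → (pstep d)^[j] (some p) ≠ some s) :
    k ≤ d.keys.length := by
  set g : Nat → Int := fun i => ((pstep d)^[i] (some p)).getD 0 with hg
  have hin : ∀ i, i < k → g i ∈ d.keys := by
    intro i hi
    obtain ⟨c, hc⟩ := iter_isSome d (some p) s i k (by omega) hk
    obtain ⟨c', hc'⟩ := iter_isSome d (some p) s (i + 1) k (by omega) hk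
    have hpm : pmap d c = some c' := by
      rw [Function.iterate_succ_apply', hc] at hc'
      exact hc'
    have hget : d.get? c ≠ none := by
      intro hnone
      rw [pmap, PySem.Dict.getD_eq_get?_getD, hnone] at hpm
      simp at hpm
    have : c ∈ d.keys := by
      by_contra hmem
      exact hget ((PySem.Dict.get?_eq_none_iff_not_mem_keys d c).mpr hmem)
    simpa [hg, hc] using this
  have hinj : Set.InjOn g (Finset.range k) := by
    intro i hi j hj hgij
    simp only [Finset.coe_range, Set.mem_Iio] at hi hj
    by_contra hne
    obtain ⟨ci, hci⟩ := iter_isSome d (some p) s i k (by omega) hk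
    obtain ⟨cj, hcj⟩ := iter_isSome d (some p) s j k (by omega) hk
    have heq : (pstep d)^[i] (some p) = (pstep d)^[j] (some p) := by
      rw [hci, hcj]
      simp only [hg, hci, hcj, Option.getD_some] at hgij
      rw [hgij]
    rcases Nat.lt_or_ge i j with h | h
    · exact iter_inj d p s k hk hmin i j h (by omega) heq
    · exact iter_inj d p s k hk hmin j i (by omega) (by omega) heq.symm
  have hcard : (Finset.range k).card ≤ d.keys.toFinset.card := by
    apply Finset.card_le_card_of_injOn g
    · intro i hi
      exact List.mem_toFinset.mpr (hin i (Finset.mem_range.mp hi))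
    · exact fun i hi j hj h => hinj (by simpa using Finset.mem_coe.mpr hi) (by simpa using Finset.mem_coe.mpr hj) h
  calc k = (Finset.range k).card := (Finset.card_range k).symm
    _ ≤ d.keys.toFinset.card := hcard
    _ ≤ d.keys.length := d.keys.toFinset_card_le

theorem keys_ofList_le (mp : List (Int × Option Int)) :
    (PySem.Dict.ofList mp).keys.length ≤ mp.length := by
  have hkeys : (PySem.Dict.ofList mp).keys = PySem.Set.ofList (mp.map Prod.fst) := by
    calc (PySem.Dict.ofList mp).keys
        = PySem.Set.update (PySem.Dict.empty (κ := Int) (ν := Option Int)).keys (mp.map Prod.fst) :=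
          PySem.Dict.keys_foldl_insert_key mp Prod.fst (fun _ p => p.2) _
      _ = PySem.Set.ofList (mp.map Prod.fst) := PySem.Set.update_nil_left _
  rw [hkeys]
  calc (PySem.Set.ofList (mp.map Prod.fst)).length ≤ (mp.map Prod.fst).length :=
        PySem.Set.length_ofList_le _
    _ = mp.length := List.length_map ..

-- ===== A-side characterisation =====

theorem aLoop_sound (s : Int) (d : PySem.Dict Int (Option Int)) :
    ∀ (fuel : Nat) (cur : Option Int) (vis : PySem.Set Int),
      aLoop s d fuel cur vis = true → ∃ k, (pstep d)^[k] cur = some s := by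
  intro fuel
  induction fuel with
  | zero => intro cur vis h; simp [aLoop] at h
  | succ n ih =>
    intro cur vis h
    cases cur with
    | none => simp [aLoop] at h
    | some c =>
      simp only [aLoop] at h
      by_cases hmem : PySem.Set.contains vis c = true
      · rw [if_pos hmem] at h; exact absurd h (by simp)
      · rw [if_neg hmem] at h
        by_cases hnext : (d.getD c none == some s) = true
        · exact ⟨1, by simpa [pstep, pmap] using eq_of_beq hnext⟩
        · rw [if_neg hnext] at h
          obtain ⟨k, hk⟩ := ih (d.getD c none) _ h
          exact ⟨k + 1, by rw [Function.iterate_succ_apply]; simpa [pstep, pmap] using hk⟩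

theorem aLoop_complete (s : Int) (d : PySem.Dict Int (Option Int)) (p : Int) (k : Nat)
    (hk : (pstep d)^[k] (some p) = some s)
    (hmin : ∀ j, j < k → (pstep d)^[j] (some p) ≠ some s) :
    ∀ (fuel : Nat) (t : Nat) (vis : PySem.Set Int), t < k → k - t ≤ fuel →
      (∀ x ∈ vis, ∃ i, i < t ∧ (pstep d)^[i] (some p) = some x) →
      aLoop s d fuel ((pstep d)^[t] (some p)) vis = true := by
  intro fuel
  induction fuel with
  | zero => intro t vis ht hf _; omega
  | succ n ih =>
    intro t vis ht hf hvis
    obtain ⟨c, hc⟩ := iter_isSome d (some p) s t k (by omega) hk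
    rw [hc]
    simp only [aLoop]
    have hnot : ¬ PySem.Set.contains vis c = true := by
      intro hmem
      obtain ⟨i, hi, hix⟩ := hvis c ((PySem.Set.contains_iff vis c).mp hmem)
      exact iter_inj d p s k hk hmin i t hi (by omega) (by rw [hix, hc])
    rw [if_neg hnot]
    have hnext : (pstep d)^[t + 1] (some p) = d.getD c none := by
      rw [Function.iterate_succ_apply', hc]; rfl
    by_cases ht1 : t + 1 = k
    · have : d.getD c none = some s := by rw [← hnext, ht1]; exact hk
      rw [if_pos (by simpa using this)]
    · have hne : ¬ (d.getD c none == some s) = true := by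
        intro hb
        exact hmin (t + 1) (by omega) (by rw [hnext]; exact eq_of_beq hb)
      rw [if_neg hne]
      have := ih (t + 1) (PySem.Set.add vis c) (by omega) (by omega) ?_
      · rw [hnext] at this; exact this
      · intro x hx
        rcases (PySem.Set.mem_add vis c x).mp hx with hx' | hx'
        · obtain ⟨i, hi, hix⟩ := hvis x hx'
          exact ⟨i, by omega, hix⟩
        · exact ⟨t, by omega, by rw [hx', hc]⟩

theorem A_iff (s p : Int) (mp : List (Int × Option Int)) :
    category_matches (some s) (some p) mp = true ↔
      ∃ k, (pstep (PySem.Dict.ofList mp))^[k] (some p) = some s := by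
  set d := PySem.Dict.ofList mp with hd
  constructor
  · intro h
    simp only [category_matches] at h
    by_cases hsp : (s == p) = true
    · exact ⟨0, by simpa using (eq_of_beq hsp).symm⟩
    · rw [if_neg hsp] at h
      exact aLoop_sound s d (mp.length + 1) (some p) PySem.Set.empty h
  · intro hex
    simp only [category_matches]
    by_cases hsp : (s == p) = true
    · rw [if_pos hsp]
    · rw [if_neg hsp]
      have hdp : DecidablePred fun k => (pstep d)^[k] (some p) = some s := fun k => by infer_instance
      obtain ⟨k, hk⟩ := hex
      have hkf := Nat.find_spec (p := fun k => (pstep d)^[k] (some p) = some s) ⟨k, hk⟩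
      set k0 := Nat.find (p := fun k => (pstep d)^[k] (some p) = some s) ⟨k, hk⟩ with hk0
      have hmin : ∀ j, j < k0 → (pstep d)^[j] (some p) ≠ some s := fun j hj =>
        Nat.find_min (p := fun k => (pstep d)^[k] (some p) = some s) ⟨k, hk⟩ hj
      have hk0pos : 0 < k0 := by
        rcases Nat.eq_zero_or_pos k0 with h0 | h0
        · exfalso
          rw [h0] at hkf
          simp only [Function.iterate_zero_apply, Option.some.injEq] at hkf
          exact hsp (by simp [hkf])
        · exact h0
      have hbound : k0 ≤ mp.length :=
        le_trans (chain_le_keys d p s k0 hkf hmin) (keys_ofList_le mp)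
      have := aLoop_complete s d p k0 hkf hmin (mp.length + 1) 0 PySem.Set.empty
        hk0pos (by omega) (by intro x hx; simp [PySem.Set.empty] at hx)
      simpa using this

-- ===== B-side characterisation =====

theorem bPass_mono (L : List (Int × Option Int)) :
    ∀ (r : PySem.Set Int) (x : Int), x ∈ r → x ∈ bPass L r := by
  induction L with
  | nil => intro r x hx; exact hx
  | cons hd tl ih =>
    intro r x hx
    simp only [bPass, List.foldl_cons]
    apply ih
    cases hv : hd.2 with
    | none => exact hx
    | some par =>
      dsimp only
      by_cases hc : PySem.Set.contains r par = true
      · rw [if_pos hc]; exact (PySem.Set.mem_add r hd.1 x).mpr (Or.inl hx)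
      · rw [if_neg hc]; exact hx

theorem bPass_adds (L : List (Int × Option Int)) :
    ∀ (r : PySem.Set Int) (c par : Int), (c, some par) ∈ L → par ∈ r → c ∈ bPass L r := by
  induction L with
  | nil => intro r c par h _; exact absurd h (List.not_mem_nil)
  | cons hd tl ih =>
    intro r c par hmem hpar
    simp only [bPass, List.foldl_cons]
    rcases List.mem_cons.mp hmem with hhd | htl
    · rw [← hhd]
      dsimp only
      rw [if_pos ((PySem.Set.contains_iff r par).mpr hpar)]
      exact bPass_mono tl _ c ((PySem.Set.mem_add r c c).mpr (Or.inr rfl))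
    · apply ih _ c par htl
      cases hv : hd.2 with
      | none => exact hpar
      | some q =>
        dsimp only
        by_cases hc : PySem.Set.contains r q = true
        · rw [if_pos hc]; exact (PySem.Set.mem_add r hd.1 par).mpr (Or.inl hpar)
        · rw [if_neg hc]; exact hpar

theorem bPass_inv (P : Int → Prop) :
    ∀ (L : List (Int × Option Int)) (r : PySem.Set Int),
      (∀ c par, (c, some par) ∈ L → P par → P c) → (∀ x ∈ r, P x) →
      ∀ x ∈ bPass L r, P x := by
  intro L
  induction L with
  | nil => intro r _ hr x hx; exact hr x hx
  | cons hd tl ih =>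
    intro r hstep hr x hx
    simp only [bPass, List.foldl_cons] at hx
    refine ih _ (fun c par hm hp => hstep c par (List.mem_cons_of_mem hd hm) hp) ?_ x hx
    intro y hy
    cases hv : hd.2 with
    | none => rw [hv] at hy; exact hr y hy
    | some par =>
      rw [hv] at hy
      dsimp only at hy
      by_cases hc : PySem.Set.contains r par = true
      · rw [if_pos hc] at hy
        rcases (PySem.Set.mem_add r hd.1 y).mp hy with hy' | hy'
        · exact hr y hy'
        · rw [hy']
          exact hstep hd.1 par (by rw [← hv]; exact List.mem_cons_self ..)
            (hr par ((PySem.Set.contains_iff r par).mp hc))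
      · rw [if_neg hc] at hy; exact hr y hy

-- Each pass only appends new elements at the back.
theorem bPass_append (L : List (Int × Option Int)) :
    ∀ (r : PySem.Set Int), ∃ t, bPass L r = r ++ t := by
  induction L with
  | nil => intro r; exact ⟨[], (List.append_nil r).symm⟩
  | cons hd tl ih =>
    intro r
    simp only [bPass, List.foldl_cons]
    have hstep : ∃ u, (match hd.2 with
        | some parent => if PySem.Set.contains r parent then PySem.Set.add r hd.1 else r
        | none => r) = r ++ u := by
      cases hv : hd.2 with
      | none => exact ⟨[], (List.append_nil r).symm⟩
      | some par =>
        dsimp only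
        by_cases hc : PySem.Set.contains r par = true
        · rw [if_pos hc, PySem.Set.add_eq_ite]
          by_cases hm : hd.1 ∈ r
          · rw [if_pos hm]; exact ⟨[], (List.append_nil r).symm⟩
          · rw [if_neg hm]; exact ⟨[hd.1], rfl⟩
        · rw [if_neg hc]; exact ⟨[], (List.append_nil r).symm⟩
    obtain ⟨u, hu⟩ := hstep
    rw [hu]
    obtain ⟨t, ht⟩ := ih (r ++ u)
    exact ⟨u ++ t, ht.trans (List.append_assoc r u t)⟩

-- A pass that does not change the size did not change the set: it is a fixed point.
theorem bPass_fix_of_len (L : List (Int × Option Int)) (r : PySem.Set Int)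
    (h : (PySem.Set.len (bPass L r) == PySem.Set.len r) = true) : bPass L r = r := by
  obtain ⟨t, ht⟩ := bPass_append L r
  have hlen : (bPass L r).length = r.length := by
    have := beq_iff_eq.mp h
    simpa [PySem.Set.len] using this
  rw [ht] at hlen ⊢
  have : t = [] := by
    rw [List.length_append] at hlen
    exact List.eq_nil_of_length_eq_zero (by omega)
  rw [this, List.append_nil]

theorem iterate_fix {α : Type} (g : α → α) (r : α) (h : g r = r) :
    ∀ n, g^[n] r = r := by
  intro n
  induction n with
  | zero => rfl
  | succ m ih => rw [Function.iterate_succ_apply, h]; exact ih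

-- The early-stopping rounds loop computes exactly n passes.
theorem bRounds_eq (L : List (Int × Option Int)) :
    ∀ (n : Nat) (r : PySem.Set Int), bRounds L n r = (fun r => bPass L r)^[n] r := by
  intro n
  induction n with
  | zero => intro r; rfl
  | succ m ih =>
    intro r
    simp only [bRounds]
    by_cases h : (PySem.Set.len (bPass L r) == PySem.Set.len r) = true
    · rw [if_pos h]
      have hfix := bPass_fix_of_len L r h
      rw [hfix, Function.iterate_succ_apply, hfix, iterate_fix _ r hfix m]
    · rw [if_neg h, ih, Function.iterate_succ_apply]

theorem iterate_bPass_mono (L : List (Int × Option Int)) (x : Int) :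
    ∀ (n : Nat) (r : PySem.Set Int), x ∈ r → x ∈ (fun r => bPass L r)^[n] r := by
  intro n
  induction n with
  | zero => intro r hx; exact hx
  | succ m ih =>
    intro r hx
    rw [Function.iterate_succ_apply']
    exact bPass_mono L _ x (ih r hx)

theorem B_complete (d : PySem.Dict Int (Option Int)) (s : Int) :
    ∀ (k : Nat) (p : Int), (pstep d)^[k] (some p) = some s →
      p ∈ (fun r => bPass d.items r)^[k] (PySem.Set.add PySem.Set.empty s) := by
  intro k
  induction k with
  | zero =>
    intro p hp
    simp only [Function.iterate_zero_apply, Option.some.injEq] at hp ⊢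
    exact (PySem.Set.mem_add _ s p).mpr (Or.inr hp)
  | succ n ih =>
    intro p hp
    rw [Function.iterate_succ_apply] at hp
    have hps : pstep d (some p) = pmap d p := rfl
    cases hq : pmap d p with
    | none =>
      exfalso
      rw [hps, hq, pstep_iterate_none] at hp
      simp at hp
    | some q =>
      rw [hps, hq] at hp
      have hitem : (p, some q) ∈ d.items := by
        apply PySem.Dict.mem_items_of_get?_eq_some
        rw [pmap, PySem.Dict.getD_eq_get?_getD] at hq
        cases hg : d.get? p with
        | none => rw [hg] at hq; simp at hq
        | some v => rw [hg] at hq; simp only [Option.getD_some] at hq; rw [hq]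
      rw [Function.iterate_succ_apply']
      exact bPass_adds d.items _ p q hitem (ih q hp)

theorem B_sound (d : PySem.Dict Int (Option Int)) (s : Int) (hnd : d.keys.Nodup) :
    ∀ (n : Nat) (x : Int), x ∈ (fun r => bPass d.items r)^[n] (PySem.Set.add PySem.Set.empty s) →
      ∃ j, (pstep d)^[j] (some x) = some s := by
  intro n
  induction n with
  | zero =>
    intro x hx
    simp only [Function.iterate_zero_apply] at hx
    rcases (PySem.Set.mem_add _ s x).mp hx with hx' | hx'
    · exact absurd hx' (List.not_mem_nil)
    · exact ⟨0, by rw [hx']; rfl⟩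
  | succ m ih =>
    intro x hx
    rw [Function.iterate_succ_apply'] at hx
    refine bPass_inv (fun y => ∃ j, (pstep d)^[j] (some y) = some s) d.items _ ?_ ih x hx
    intro c par hitem ⟨j, hj⟩
    refine ⟨j + 1, ?_⟩
    rw [Function.iterate_succ_apply]
    have : pstep d (some c) = some par := by
      show pmap d c = some par
      rw [pmap, PySem.Dict.getD_of_mem_items d hitem hnd none]
    rw [this]; exact hj

theorem B_iff (s p : Int) (mp : List (Int × Option Int)) :
    category_matches_alt (some s) (some p) mp = true ↔
      ∃ k, (pstep (PySem.Dict.ofList mp))^[k] (some p) = some s := by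
  set d := PySem.Dict.ofList mp with hd
  have hcov : category_matches_alt (some s) (some p) mp =
      PySem.Set.contains ((fun r => bPass d.items r)^[mp.length] (PySem.Set.add PySem.Set.empty s)) p := by
    simp only [category_matches_alt]
    rw [bRounds_eq d.items mp.length]
  rw [hcov]
  constructor
  · intro h
    obtain ⟨j, hj⟩ := B_sound d s (PySem.Dict.nodup_keys_ofList mp) mp.length p
      ((PySem.Set.contains_iff _ p).mp h)
    exact ⟨j, hj⟩
  · intro hex
    obtain ⟨k, hk⟩ := hex
    have hkf := Nat.find_spec (p := fun k => (pstep d)^[k] (some p) = some s) ⟨k, hk⟩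
    set k0 := Nat.find (p := fun k => (pstep d)^[k] (some p) = some s) ⟨k, hk⟩ with hk0
    have hmin : ∀ j, j < k0 → (pstep d)^[j] (some p) ≠ some s := fun j hj =>
      Nat.find_min (p := fun k => (pstep d)^[k] (some p) = some s) ⟨k, hk⟩ hj
    have hbound : k0 ≤ mp.length :=
      le_trans (chain_le_keys d p s k0 hkf hmin) (keys_ofList_le mp)
    have hp0 : p ∈ (fun r => bPass d.items r)^[k0] (PySem.Set.add PySem.Set.empty s) :=
      B_complete d s k0 p hkf
    have hpn : p ∈ (fun r => bPass d.items r)^[mp.length] (PySem.Set.add PySem.Set.empty s) := by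
      have hsplit : mp.length = (mp.length - k0) + k0 := by omega
      rw [hsplit, Function.iterate_add_apply]
      exact iterate_bPass_mono d.items p (mp.length - k0) _ hp0
    exact (PySem.Set.contains_iff _ p).mpr hpn

-- ===== VERDICT (by name: the statement is the Claim_ definition above) =====
theorem category_matches_spec : Claim_equal_category_matches := by
  intro sub post mp _
  show category_matches sub post mp = category_matches_alt sub post mp
  cases sub with
  | none => cases post <;> rfl
  | some s =>
    cases post with
    | none => rfl
    | some p =>
      have h := (A_iff s p mp).trans (B_iff s p mp).symm
      cases hb : category_matches_alt (some s) (some p) mp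
      · cases ha : category_matches (some s) (some p) mp
        · rfl
        · exact absurd (h.mp ha) (by rw [hb]; simp)
      · exact h.mpr hb
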